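-- pv_equiv track=rewrite | github.com/Dennp333/Tic-Tac-Toe | tic-tac-toe.py | chooseMax
-- ===== SOURCE A (Python) =====
-- def chooseMax(values):
--     scores = []
--     depths = []
--     maxScorers = []
--     for i in range(len(values)):
--         scores.append(values[i][0])
--         depths.append(values[i][1])
--     maxScore = max(scores)
--     for i in range(len(scores)):
--         if scores[i] == maxScore:
--             maxScorers.append(depths[i])
--     return [maxScore, min(maxScorers)]
-- ===== SOURCE B (Python) =====
-- def chooseMax(values):
--     it = iter(values)
--     try:
--         v = next(it)
--     except StopIteration:
--         raise ValueError("chooseMax() arg is an empty sequence")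
--     bestScore = v[0]
--     bestDepth = v[1]
--     for v in it:
--         if v[0] > bestScore:
--             bestScore = v[0]
--             bestDepth = v[1]
--         elif v[0] == bestScore:
--             bestDepth = min(bestDepth, v[1])
--     return [bestScore, bestDepth]
-- ===== Notes on version B (the rewrite author's own statement) =====
-- stated objective: simpler
-- what changed: Replaces A's three intermediate lists and two index loops (plus max()/min() passes) by a single pass that tracks the running best score and the minimum depth among its scorers.
import Mathlib
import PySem

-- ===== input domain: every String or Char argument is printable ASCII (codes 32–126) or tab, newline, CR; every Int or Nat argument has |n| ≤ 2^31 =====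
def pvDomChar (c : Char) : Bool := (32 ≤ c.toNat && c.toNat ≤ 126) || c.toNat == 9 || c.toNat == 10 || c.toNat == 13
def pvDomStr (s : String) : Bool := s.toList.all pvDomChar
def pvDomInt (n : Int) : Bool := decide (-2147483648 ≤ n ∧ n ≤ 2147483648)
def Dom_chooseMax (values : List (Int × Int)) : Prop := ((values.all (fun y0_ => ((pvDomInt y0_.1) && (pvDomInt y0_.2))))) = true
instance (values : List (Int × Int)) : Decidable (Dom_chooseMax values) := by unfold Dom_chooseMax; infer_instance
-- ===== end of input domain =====

-- B replaces A's three intermediate lists and two index loops by one single pass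
-- tracking the best score and the minimum depth among its scorers (objective: simpler).

-- ===== PORT A =====
def chooseMax (values : List (Int × Int)) : List Int :=
  let scores := (PySem.List.pyRange 0 (values.length : Int) 1).foldl
      (fun acc i => acc ++ [(PySem.List.pyGetD values i ((0 : Int), (0 : Int))).1]) []
  let depths := (PySem.List.pyRange 0 (values.length : Int) 1).foldl
      (fun acc i => acc ++ [(PySem.List.pyGetD values i ((0 : Int), (0 : Int))).2]) []
  -- max(scores): Python raises ValueError on an empty list; Pre_ excludes values = []
  let maxScore := (PySem.List.max? scores (fun x => x)).getD 0
  let maxScorers := (PySem.List.pyRange 0 (scores.length : Int) 1).foldl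
      (fun acc i => if PySem.List.pyGetD scores i 0 = maxScore
                    then acc ++ [PySem.List.pyGetD depths i 0] else acc) []
  [maxScore, (PySem.List.min? maxScorers (fun x => x)).getD 0]

-- ===== PORT B =====
def chooseMaxLoop (bs bd : Int) : List (Int × Int) → Int × Int
  | [] => (bs, bd)
  | v :: rest =>
    if v.1 > bs then chooseMaxLoop v.1 v.2 rest
    else if v.1 = bs then chooseMaxLoop bs (min bd v.2) rest
    else chooseMaxLoop bs bd rest

def chooseMax_alt (values : List (Int × Int)) : List Int :=
  match values with
  | [] => []   -- Python B raises ValueError here; outside Pre_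
  | v :: rest => let r := chooseMaxLoop v.1 v.2 rest; [r.1, r.2]

-- ===== PRECONDITION & SPEC =====
-- Pre_ excludes only the empty list, on which both Pythons raise ValueError.
def Pre_chooseMax (values : List (Int × Int)) : Prop := values ≠ []
instance (values : List (Int × Int)) : Decidable (Pre_chooseMax values) := by unfold Pre_chooseMax; infer_instance
def pvWitness_chooseMax : (List (Int × Int)) := [(1, 2), (1, 0), (0, 5)]

def Spec_chooseMax (values : List (Int × Int)) (out : List Int) : Prop := out = chooseMax_alt values
instance (values : List (Int × Int)) (out : List Int) : Decidable (Spec_chooseMax values out) := by unfold Spec_chooseMax; infer_instance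

-- ===== CLAIM (what is proved, stated in full; the proofs are below) =====
def Claim_equal_chooseMax : Prop := ∀ (values : List (Int × Int)), Dom_chooseMax values → Pre_chooseMax values → Spec_chooseMax values (chooseMax values)

-- ===== LEMMAS AND PROOFS =====

-- running max of the scores, seeded with bs
def pvS (bs : Int) (l : List (Int × Int)) : Int := l.foldl (fun a w => max a w.1) bs

-- one step of Python min over an optional running minimum
def pvOmin (o : Option Int) (x : Int) : Option Int :=
  some (match o with | none => x | some m => min m x)

-- depths of the entries whose score is M
def pvFil (l : List (Int × Int)) (M : Int) : List Int :=
  (l.filter (fun w => w.1 = M)).map (·.2)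

theorem pvOmin_some (l : List Int) (x : Int) :
    l.foldl pvOmin (some x) = some (l.foldl min x) := by
  induction l generalizing x with
  | nil => rfl
  | cons y t ih => simpa [pvOmin] using ih (min x y)

theorem pvMinGetD (l : List Int) :
    (PySem.List.min? l (fun x => x)).getD 0 = ((l.foldl pvOmin none).getD 0) := by
  cases l with
  | nil => rfl
  | cons x t =>
    rw [PySem.List.min?_id_cons]
    show (t.foldl min x) = ((t.foldl pvOmin (pvOmin none x)).getD 0)
    simp [pvOmin, pvOmin_some]

theorem pvFil_cons (w : Int × Int) (t : List (Int × Int)) (M : Int) :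
    pvFil (w :: t) M = (if w.1 = M then [w.2] else []) ++ pvFil t M := by
  by_cases h : w.1 = M <;> simp [pvFil, h]

theorem pvS_le (bs : Int) (l : List (Int × Int)) : bs ≤ pvS bs l :=
  (PySem.List.le_foldl_max_int l (·.1) bs).1

-- appending one element to the filtered-depth fold absorbs into the seed
theorem pvFoldFil_cons (w : Int × Int) (t : List (Int × Int)) (M : Int) (o : Option Int) :
    (pvFil (w :: t) M).foldl pvOmin o
      = (pvFil t M).foldl pvOmin (if w.1 = M then pvOmin o w.2 else o) := by
  rw [pvFil_cons]
  by_cases h : w.1 = M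
  · rw [if_pos h, if_pos h]; rfl
  · rw [if_neg h, if_neg h]; rfl

theorem chooseMaxLoop_spec (l : List (Int × Int)) (bs bd : Int) :
    chooseMaxLoop bs bd l =
      (pvS bs l,
       ((pvFil l (pvS bs l)).foldl pvOmin (if bs = pvS bs l then some bd else none)).getD 0) := by
  induction l generalizing bs bd with
  | nil => simp [chooseMaxLoop, pvS, pvFil]
  | cons w t ih =>
    have hS : pvS bs (w :: t) = pvS (max bs w.1) t := rfl
    by_cases h1 : w.1 > bs
    · have hmax : max bs w.1 = w.1 := by omega
      have hbs : ¬ bs = pvS w.1 t := by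
        have := pvS_le w.1 t; omega
      rw [show chooseMaxLoop bs bd (w :: t) = chooseMaxLoop w.1 w.2 t by
            simp [chooseMaxLoop, h1], ih, hS, hmax, if_neg hbs, pvFoldFil_cons]
      by_cases h2 : w.1 = pvS w.1 t
      · rw [if_pos h2, if_pos h2]; rfl
      · rw [if_neg h2, if_neg h2]
    · by_cases h2 : w.1 = bs
      · have hmax : max bs w.1 = bs := by omega
        rw [show chooseMaxLoop bs bd (w :: t) = chooseMaxLoop bs (min bd w.2) t by
              simp [chooseMaxLoop, h2], ih, hS, hmax, pvFoldFil_cons, h2]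
        by_cases h3 : bs = pvS bs t
        · rw [if_pos h3, if_pos h3, if_pos h3]; rfl
        · rw [if_neg h3, if_neg h3, if_neg h3]
      · have hmax : max bs w.1 = bs := by omega
        have hne : ¬ w.1 = pvS bs t := by
          have := pvS_le bs t; omega
        rw [show chooseMaxLoop bs bd (w :: t) = chooseMaxLoop bs bd t by
              simp [chooseMaxLoop, h1, h2], ih, hS, hmax, pvFoldFil_cons, if_neg hne]

-- indexing the score / depth lists is projecting the pair at that index
theorem pvGet1 (values : List (Int × Int)) (i : Int) :
    PySem.List.pyGetD (values.map (·.1)) i 0 = (PySem.List.pyGetD values i ((0 : Int), (0 : Int))).1 :=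
  PySem.List.pyGetD_map (·.1) values i ((0 : Int), (0 : Int))

theorem pvGet2 (values : List (Int × Int)) (i : Int) :
    PySem.List.pyGetD (values.map (·.2)) i 0 = (PySem.List.pyGetD values i ((0 : Int), (0 : Int))).2 :=
  PySem.List.pyGetD_map (·.2) values i ((0 : Int), (0 : Int))

theorem chooseMax_eq (v : Int × Int) (rest : List (Int × Int)) :
    chooseMax (v :: rest) = chooseMax_alt (v :: rest) := by
  have hscores : (PySem.List.pyRange 0 (((v :: rest).length : Nat) : Int) 1).foldl
      (fun acc i => acc ++ [(PySem.List.pyGetD (v :: rest) i ((0 : Int), (0 : Int))).1]) []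
      = (v :: rest).map (·.1) := by
    rw [PySem.List.foldl_pyRange_zero_pyGetD' (v :: rest) ((0 : Int), (0 : Int))
        (fun acc w => acc ++ [w.1]) []]
    exact PySem.List.foldl_append_singleton_eq_map _ _ _
  have hdepths : (PySem.List.pyRange 0 (((v :: rest).length : Nat) : Int) 1).foldl
      (fun acc i => acc ++ [(PySem.List.pyGetD (v :: rest) i ((0 : Int), (0 : Int))).2]) []
      = (v :: rest).map (·.2) := by
    rw [PySem.List.foldl_pyRange_zero_pyGetD' (v :: rest) ((0 : Int), (0 : Int))
        (fun acc w => acc ++ [w.2]) []]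
    exact PySem.List.foldl_append_singleton_eq_map _ _ _
  have hmax : (PySem.List.max? ((v :: rest).map (·.1)) (fun x => x)).getD 0 = pvS v.1 rest := by
    show (PySem.List.max? (v.1 :: rest.map (·.1)) (fun x => x)).getD 0 = pvS v.1 rest
    rw [PySem.List.max?_id_cons]
    show (rest.map (·.1)).foldl max v.1 = pvS v.1 rest
    rw [List.foldl_map]; rfl
  simp only [chooseMax, hscores, hdepths, List.length_map, pvGet1, pvGet2, hmax]
  rw [PySem.List.foldl_pyRange_zero_pyGetD' (v :: rest) ((0 : Int), (0 : Int))
      (fun acc w => if w.1 = pvS v.1 rest then acc ++ [w.2] else acc) [],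
      PySem.List.foldl_append_ite (fun w => w.1 = pvS v.1 rest) (·.2) (v :: rest) []]
  show [pvS v.1 rest, (PySem.List.min? (pvFil (v :: rest) (pvS v.1 rest)) (fun x => x)).getD 0]
      = chooseMax_alt (v :: rest)
  rw [pvMinGetD, pvFoldFil_cons]
  show _ = [ (chooseMaxLoop v.1 v.2 rest).1, (chooseMaxLoop v.1 v.2 rest).2 ]
  rw [chooseMaxLoop_spec]
  by_cases h : v.1 = pvS v.1 rest
  · rw [if_pos h, if_pos h]; rfl
  · rw [if_neg h, if_neg h]

-- ===== VERDICT (by name: the statement is the Claim_ definition above) =====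
theorem chooseMax_spec : Claim_equal_chooseMax := by
  intro values _ hpre
  unfold Spec_chooseMax
  match values with
  | [] => exact absurd rfl hpre
  | v :: rest => exact chooseMax_eq v rest
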